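-- pv_equiv track=rewrite | github.com/wuwangzhang1216/OpportunityRadar | src/opportunity_radar/scrapers/mlh_scraper.py | _is_blocked
-- ===== SOURCE A (Python) =====
-- def _is_blocked(html: str) -> bool:
--     """Check if the response is a block/challenge page."""
--     block_indicators = [
--         "Access denied",
--         "Just a moment",
--         "Checking your browser",
--         "Enable JavaScript and cookies",
--         "cf-browser-verification",
--         "challenge-platform",
--     ]
--     return any(indicator in html for indicator in block_indicators)
-- ===== SOURCE B (Python) =====
-- import re
--
-- _BLOCK_RE = re.compile("|".join(map(re.escape, [
--     "Access denied",
--     "Just a moment",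
--     "Checking your browser",
--     "Enable JavaScript and cookies",
--     "cf-browser-verification",
--     "challenge-platform",
-- ])))
--
--
-- def _is_blocked(html: str) -> bool:
--     """Check if the response is a block/challenge page."""
--     return _BLOCK_RE.search(html) is not None
-- ===== Notes on version B (the rewrite author's own statement) =====
-- stated objective: idiomatic
-- what changed: Replaces six separate substring-membership scans with one precompiled regular expression (the escaped indicators joined by alternation) and a single re.search pass over the html.
import Mathlib
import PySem

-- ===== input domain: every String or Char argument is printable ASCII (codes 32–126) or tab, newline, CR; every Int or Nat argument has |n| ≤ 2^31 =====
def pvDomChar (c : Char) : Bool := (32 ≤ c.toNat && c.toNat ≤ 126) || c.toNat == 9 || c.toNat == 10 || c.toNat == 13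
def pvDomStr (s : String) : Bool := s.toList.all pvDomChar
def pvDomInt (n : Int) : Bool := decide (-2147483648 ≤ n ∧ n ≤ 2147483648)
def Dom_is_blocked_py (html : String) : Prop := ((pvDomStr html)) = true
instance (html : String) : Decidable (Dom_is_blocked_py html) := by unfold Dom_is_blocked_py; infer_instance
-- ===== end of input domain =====

-- B replaces A's six independent 'in' scans with one precompiled regex of the
-- escaped indicators joined by '|' and a single re.search pass (idiomatic).

-- ===== PORT A =====
-- the literal list from A's body
def pvBlockIndicators : List String :=
  ["Access denied", "Just a moment", "Checking your browser",
   "Enable JavaScript and cookies", "cf-browser-verification", "challenge-platform"]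

-- any(indicator in html for indicator in block_indicators)
def is_blocked_py (html : String) : Bool :=
  pvBlockIndicators.any (fun indicator => PySem.Str.isIn indicator html)

-- ===== PORT B =====
-- Hand port of re.search(_BLOCK_RE, html) ≠ None for a regex that is an
-- alternation of re.escape'd LITERALS: the engine tries each position left to
-- right and at each position tries the alternatives in order; an escaped
-- literal matches exactly itself, so this scan is exact for this pattern.
def pvReSearchLits (pats : List (List Char)) : List Char → Bool
  | [] => pats.any (fun p => PySem.Chars.startswith [] p)
  | c :: rest =>
      pats.any (fun p => PySem.Chars.startswith (c :: rest) p) || pvReSearchLits pats rest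

def is_blocked_py_alt (html : String) : Bool :=
  pvReSearchLits (pvBlockIndicators.map String.toList) html.toList

-- ===== PRECONDITION & SPEC =====
def Spec_is_blocked_py (html : String) (out : Bool) : Prop := out = is_blocked_py_alt html
instance (html : String) (out : Bool) : Decidable (Spec_is_blocked_py html out) := by unfold Spec_is_blocked_py; infer_instance

-- ===== CLAIM =====
def Claim_equal_is_blocked_py : Prop := ∀ (html : String), Dom_is_blocked_py html → Spec_is_blocked_py html (is_blocked_py html)

-- ===== LEMMAS AND PROOFS =====

-- the leftmost-scan search finds a pattern iff some pattern is a prefix of some suffix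
lemma pvReSearchLits_iff (pats : List (List Char)) (s : List Char) :
    pvReSearchLits pats s = true ↔ ∃ p ∈ pats, ∃ j, p <+: s.drop j := by
  induction s with
  | nil =>
      simp only [pvReSearchLits, List.any_eq_true, PySem.Chars.startswith_iff, List.drop_nil]
      constructor
      · rintro ⟨p, hp, hpre⟩; exact ⟨p, hp, 0, hpre⟩
      · rintro ⟨p, hp, _, hpre⟩; exact ⟨p, hp, hpre⟩
  | cons c rest ih =>
      simp only [pvReSearchLits, Bool.or_eq_true, List.any_eq_true,
        PySem.Chars.startswith_iff, ih]
      constructor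
      · rintro (⟨p, hp, hpre⟩ | ⟨p, hp, j, hpre⟩)
        · exact ⟨p, hp, 0, hpre⟩
        · exact ⟨p, hp, j + 1, by simpa using hpre⟩
      · rintro ⟨p, hp, j, hpre⟩
        cases j with
        | zero => exact Or.inl ⟨p, hp, by simpa using hpre⟩
        | succ j => exact Or.inr ⟨p, hp, j, by simpa using hpre⟩

lemma pv_eq (html : String) : is_blocked_py html = is_blocked_py_alt html := by
  unfold is_blocked_py is_blocked_py_alt
  rw [Bool.eq_iff_iff, pvReSearchLits_iff]
  simp only [List.any_eq_true, PySem.Str.isIn_eq, List.mem_map]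
  constructor
  · rintro ⟨ind, hmem, hin⟩
    obtain ⟨j, hj⟩ := (PySem.Chars.exists_prefix_drop_iff_isIn _ _ ).2 hin
    exact ⟨ind.toList, ⟨ind, hmem, rfl⟩, j, hj⟩
  · rintro ⟨p, ⟨ind, hmem, rfl⟩, j, hj⟩
    exact ⟨ind, hmem, (PySem.Chars.exists_prefix_drop_iff_isIn _ _).1 ⟨j, hj⟩⟩

-- ===== VERDICT =====
theorem is_blocked_py_spec : Claim_equal_is_blocked_py := by
  intro html _
  unfold Spec_is_blocked_py
  exact pv_eq html
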